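-- pv_equiv track=rewrite | github.com/Michael-L340/Ai_agent | app/services/company_name_memory.py | _match_entries
-- ===== SOURCE A (Python) =====
-- from typing import Any
--
-- def _match_entries(entries: list[dict[str, Any]], normalized_texts: list[str]) -> list[dict[str, Any]]:
--     matched: list[dict[str, Any]] = []
--     for entry in entries:
--         source_key = str(entry.get("normalized_source") or "").strip()
--         if not source_key:
--             continue
--         mode = str(entry.get("match_mode") or "substring").strip().lower()
--         for normalized_text in normalized_texts:
--             if not normalized_text:
--                 continue
--             if mode == "exact":
--                 if normalized_text == source_key:
--                     matched.append(entry)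
--                     break
--             else:
--                 if source_key in normalized_text:
--                     matched.append(entry)
--                     break
--
--     matched.sort(key=lambda item: len(str(item.get("normalized_source") or "")), reverse=True)
--     return matched
-- ===== SOURCE B (Python) =====
-- def _match_entries(entries, normalized_texts):
--     texts = [t for t in normalized_texts if t]
--     exact_texts = set(texts)
--
--     def hits(entry):
--         key = str(entry.get("normalized_source") or "").strip()
--         if not key:
--             return False
--         mode = str(entry.get("match_mode") or "substring").strip().lower()
--         if mode == "exact":
--             return key in exact_texts
--         return any(key in t for t in texts)
--
--     # bucket (counting-style) sort by key length, descending, stable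
--     buckets = {}
--     for entry in entries:
--         if hits(entry):
--             length = len(str(entry.get("normalized_source") or ""))
--             buckets.setdefault(length, []).append(entry)
--
--     out = []
--     for length in sorted(buckets, reverse=True):
--         out.extend(buckets[length])
--     return out
-- ===== Notes on version B (the rewrite author's own statement) =====
-- stated objective: alternative
-- what changed: B hoists the text scan out of the entry loop (non-empty texts filtered once, a hash set of texts replaces the inner scan for exact-mode entries) and replaces the comparison sort by a stable bucket sort: matched entries are grouped by key length in a dict built in one pass and emitted by descending length.
import Mathlib
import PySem

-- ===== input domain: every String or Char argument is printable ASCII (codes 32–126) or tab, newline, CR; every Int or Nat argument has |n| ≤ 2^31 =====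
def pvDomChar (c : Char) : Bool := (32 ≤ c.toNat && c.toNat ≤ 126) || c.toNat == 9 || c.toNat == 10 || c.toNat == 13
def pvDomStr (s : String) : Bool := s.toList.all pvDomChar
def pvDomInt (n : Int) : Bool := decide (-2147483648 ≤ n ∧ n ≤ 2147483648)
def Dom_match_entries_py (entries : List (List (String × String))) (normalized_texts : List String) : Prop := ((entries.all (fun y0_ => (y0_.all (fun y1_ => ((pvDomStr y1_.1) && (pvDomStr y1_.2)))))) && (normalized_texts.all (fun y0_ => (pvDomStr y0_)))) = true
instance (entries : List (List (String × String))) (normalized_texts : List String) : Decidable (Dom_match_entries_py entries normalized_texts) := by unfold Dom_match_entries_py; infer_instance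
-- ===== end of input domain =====

-- B replaces A's per-entry inner text scan by a text list filtered once plus a set of texts for
-- exact mode, and replaces the comparison sort by a stable length-bucket sort (alternative
-- decomposition; return values proved equal, neither program mutates its arguments' observable state).

-- ===== PORT A =====
-- source_key = str(entry.get("normalized_source") or "").strip()
def aSourceKey (e : List (String × String)) : String :=
  PySem.Str.strip (PySem.Dict.getD (PySem.Dict.mk e) "normalized_source" "")

-- mode = str(entry.get("match_mode") or "substring").strip().lower()
def aMode (e : List (String × String)) : String :=
  let m0 := PySem.Dict.getD (PySem.Dict.mk e) "match_mode" ""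
  PySem.Str.lower (PySem.Str.strip (if m0 = "" then "substring" else m0))

-- the inner 'for normalized_text in normalized_texts' loop: true = the entry was appended (break)
def aInner (mode source_key : String) : List String → Bool
  | [] => false
  | t :: ts =>
    if t = "" then aInner mode source_key ts
    else if mode = "exact" then
      (if t = source_key then true else aInner mode source_key ts)
    else
      (if PySem.Str.isIn source_key t then true else aInner mode source_key ts)

def match_entries_py (entries : List (List (String × String))) (normalized_texts : List String) : List (List (String × String)) :=
  let matched := entries.foldl (fun acc entry =>
    let source_key := aSourceKey entry
    if source_key = "" then acc
    else if aInner (aMode entry) source_key normalized_texts then acc ++ [entry] else acc) []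
  -- matched.sort(key=lambda item: len(str(item.get("normalized_source") or "")), reverse=True)
  PySem.List.sorted matched
    (fun item => PySem.Str.len (PySem.Dict.getD (PySem.Dict.mk item) "normalized_source" "")) true

-- ===== PORT B =====
-- Source B computes key and mode by the same expressions as A; aSourceKey/aMode are reused as shared helpers
-- len(str(entry.get("normalized_source") or ""))
def bLen (e : List (String × String)) : Int :=
  PySem.Str.len (PySem.Dict.getD (PySem.Dict.mk e) "normalized_source" "")

def bHits (texts : List String) (exact_texts : PySem.Set String) (e : List (String × String)) : Bool :=
  let key := aSourceKey e
  if key = "" then false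
  else
    let mode := aMode e
    if mode = "exact" then PySem.Set.contains exact_texts key
    else texts.any (fun t => PySem.Str.isIn key t)

def match_entries_py_alt (entries : List (List (String × String))) (normalized_texts : List String) : List (List (String × String)) :=
  let texts := normalized_texts.filter (fun t => !decide (t = ""))
  let exact_texts := PySem.Set.ofList texts
  -- buckets.setdefault(length, []).append(entry)  (insert overwrites in place, new keys append)
  let buckets := entries.foldl (fun d e =>
    if bHits texts exact_texts e then d.insert (bLen e) (d.getD (bLen e) [] ++ [e]) else d)
    (PySem.Dict.mk [])
  -- for length in sorted(buckets, reverse=True): out.extend(buckets[length])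
  (PySem.List.sorted buckets.keys (fun l => l) true).foldl
    (fun out l => out ++ buckets.getD l []) []

-- ===== PRECONDITION & SPEC =====
def Spec_match_entries_py (entries : List (List (String × String))) (normalized_texts : List String) (out : List (List (String × String))) : Prop := out = match_entries_py_alt entries normalized_texts
instance (entries : List (List (String × String))) (normalized_texts : List String) (out : List (List (String × String))) : Decidable (Spec_match_entries_py entries normalized_texts out) := by unfold Spec_match_entries_py; infer_instance

-- ===== CLAIM (what is proved, stated in full; the proofs are below) =====
def Claim_equal_match_entries_py : Prop := ∀ (entries : List (List (String × String))) (normalized_texts : List String), Dom_match_entries_py entries normalized_texts → Spec_match_entries_py entries normalized_texts (match_entries_py entries normalized_texts)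

-- ===== LEMMAS AND PROOFS =====

-- the per-entry decision both programs make
def hitsP (nts : List String) (e : List (String × String)) : Bool :=
  if aSourceKey e = "" then false else aInner (aMode e) (aSourceKey e) nts

-- the buckets dict B builds over a list of matched entries, in closed form
def bucketsOf (xs : List (List (String × String))) : PySem.Dict Int (List (List (String × String))) :=
  PySem.Dict.mk ((PySem.List.dedup (xs.map bLen)).map
    (fun l => (l, xs.filter (fun e => decide (bLen e = l)))))

lemma aInner_eq (mode sk : String) (nts : List String) :
    aInner mode sk nts =
      (if mode = "exact" then (nts.filter (fun t => !decide (t = ""))).contains sk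
       else (nts.filter (fun t => !decide (t = ""))).any (fun t => PySem.Str.isIn sk t)) := by
  induction nts with
  | nil => simp [aInner]
  | cons t ts ih =>
    by_cases ht : t = ""
    · simp only [aInner, if_pos ht]
      rw [List.filter_cons_of_neg (by simp [ht])]
      exact ih
    · simp only [aInner, if_neg ht]
      rw [List.filter_cons_of_pos (by simp [ht])]
      by_cases hm : mode = "exact"
      · subst hm
        rw [if_pos rfl, if_pos rfl, List.contains_cons]
        by_cases he : t = sk
        · simp [he]
        · rw [if_neg he, ih, if_pos rfl]
          have h2 : (sk == t) = false := by simp [Ne.symm he]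
          rw [h2, Bool.false_or]
      · rw [if_neg hm, if_neg hm, List.any_cons]
        simp only [PySem.Str.isIn_eq]
        by_cases hi : PySem.Chars.isIn sk.toList t.toList
        · simp [hi]
        · simp only [Bool.not_eq_true] at hi
          simp [hi, ih, hm]

lemma bHits_eq (nts : List String) (e : List (String × String)) :
    bHits (nts.filter (fun t => !decide (t = "")))
      (PySem.Set.ofList (nts.filter (fun t => !decide (t = "")))) e = hitsP nts e := by
  unfold bHits hitsP aSourceKey
  by_cases hk : PySem.Str.strip (PySem.Dict.getD (PySem.Dict.mk e) "normalized_source" "") = ""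
  · simp [hk]
  · rw [aInner_eq]
    simp only [hk, if_false]
    by_cases hm : aMode e = "exact"
    · simp [hm]
    · simp [hm]

lemma matchedA_eq (entries : List (List (String × String))) (nts : List String) :
    entries.foldl (fun acc entry =>
      let source_key := aSourceKey entry
      if source_key = "" then acc
      else if aInner (aMode entry) source_key nts then acc ++ [entry] else acc) [] =
    entries.filter (hitsP nts) := by
  rw [PySem.List.foldl_congr_mem _ _ (fun acc e => if hitsP nts e then acc ++ [e] else acc) _ ?_]
  · simpa using PySem.List.foldl_append_if_eq_filter (hitsP nts) entries []
  · intro acc x _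
    unfold hitsP
    by_cases hk : aSourceKey x = "" <;> simp [hk]

lemma find?_beq {α : Type} [BEq α] [LawfulBEq α] (ks : List α) (l : α) :
    ks.find? (fun k => k == l) = if l ∈ ks then some l else none := by
  induction ks with
  | nil => simp
  | cons k ks ih =>
    by_cases hk : k = l
    · subst hk; simp
    · rw [List.find?_cons_of_neg (by simp [hk]), ih]
      simp [List.mem_cons, Ne.symm hk]

lemma contains_bucketsOf (xs : List (List (String × String))) (l : Int) :
    (bucketsOf xs).contains l = decide (l ∈ PySem.List.dedup (xs.map bLen)) := by
  rw [Bool.eq_iff_iff]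
  simp [bucketsOf, PySem.Dict.contains]

lemma getD_bucketsOf (xs : List (List (String × String))) (l : Int) :
    (bucketsOf xs).getD l [] =
      (if l ∈ PySem.List.dedup (xs.map bLen) then xs.filter (fun e => decide (bLen e = l)) else []) := by
  unfold bucketsOf PySem.Dict.getD PySem.Dict.get?
  rw [show (PySem.Dict.mk ((PySem.List.dedup (xs.map bLen)).map
      (fun l => (l, xs.filter (fun e => decide (bLen e = l)))))).items =
      (PySem.List.dedup (xs.map bLen)).map
      (fun l => (l, xs.filter (fun e => decide (bLen e = l)))) from rfl]
  rw [List.find?_map]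
  rw [show ((fun p : Int × List (List (String × String)) => p.1 == l) ∘
      (fun k : Int => (k, xs.filter (fun e => decide (bLen e = k))))) = (fun k => k == l) from rfl]
  rw [find?_beq]
  split <;> simp_all

lemma dedup_append_singleton {α : Type} [BEq α] [LawfulBEq α] (ys : List α) (l : α) :
    PySem.List.dedup (ys ++ [l]) =
      (if l ∈ ys then PySem.List.dedup ys else PySem.List.dedup ys ++ [l]) := by
  rw [PySem.List.dedup_eq_ofList, PySem.List.dedup_eq_ofList, PySem.Set.ofList_eq_foldl,
      PySem.Set.ofList_eq_foldl, List.foldl_append]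
  simp only [List.foldl]
  rw [show List.foldl PySem.Set.add [] ys = PySem.Set.ofList ys from
    (PySem.Set.ofList_eq_foldl ys).symm]
  by_cases h : l ∈ ys
  · simp [PySem.Set.add, PySem.Set.contains, h]
  · simp [PySem.Set.add, PySem.Set.contains, h]

lemma filter_append_singleton_of_ne (xs : List (List (String × String)))
    (e : List (String × String)) (k : Int) (hk : bLen e ≠ k) :
    (xs ++ [e]).filter (fun x => decide (bLen x = k)) =
      xs.filter (fun x => decide (bLen x = k)) := by
  rw [List.filter_append]
  simp [hk]

lemma bucketsOf_append (xs : List (List (String × String))) (e : List (String × String)) :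
    bucketsOf (xs ++ [e]) =
      (bucketsOf xs).insert (bLen e) ((bucketsOf xs).getD (bLen e) [] ++ [e]) := by
  have hmapapp : (xs ++ [e]).map bLen = xs.map bLen ++ [bLen e] := by simp
  unfold PySem.Dict.insert
  by_cases h : bLen e ∈ xs.map bLen
  · have hmem : bLen e ∈ PySem.List.dedup (xs.map bLen) := (PySem.List.mem_dedup _ _).mpr h
    rw [contains_bucketsOf, if_pos (by simpa using hmem), getD_bucketsOf, if_pos hmem]
    show bucketsOf (xs ++ [e]) = PySem.Dict.mk _
    unfold bucketsOf
    apply congrArg PySem.Dict.mk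
    rw [hmapapp, dedup_append_singleton, if_pos h]
    show _ = ((PySem.List.dedup (xs.map bLen)).map _).map _
    rw [List.map_map]
    apply List.map_congr_left
    intro k hk
    by_cases hkl : k = bLen e
    · subst hkl
      simp only [Function.comp]
      rw [List.filter_append]
      simp
    · simp only [Function.comp]
      have hb : (k == bLen e) = false := by simp [hkl]
      simp only [hb, Bool.false_eq_true, if_false]
      rw [filter_append_singleton_of_ne xs e k (fun hc => hkl hc.symm)]
  · have hmem : bLen e ∉ PySem.List.dedup (xs.map bLen) := fun hc => h ((PySem.List.mem_dedup _ _).mp hc)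
    rw [contains_bucketsOf, if_neg (by simpa using hmem), getD_bucketsOf, if_neg hmem]
    show bucketsOf (xs ++ [e]) = PySem.Dict.mk _
    unfold bucketsOf
    apply congrArg PySem.Dict.mk
    rw [hmapapp, dedup_append_singleton, if_neg h, List.map_append]
    apply congrArg₂ (· ++ ·)
    · apply List.map_congr_left
      intro k hk
      have hkl : bLen e ≠ k := by
        intro hc
        exact h (hc ▸ ((PySem.List.mem_dedup _ _).mp hk))
      rw [filter_append_singleton_of_ne xs e k hkl]
    · have hnil : xs.filter (fun x => decide (bLen x = bLen e)) = [] := by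
        rw [List.filter_eq_nil_iff]
        intro x hx
        simp only [decide_eq_true_eq]
        intro hc
        exact h (hc ▸ List.mem_map_of_mem hx)
      simp [List.filter_append, hnil]

lemma buckets_fold (xs : List (List (String × String))) :
    xs.foldl (fun d e => d.insert (bLen e) (d.getD (bLen e) [] ++ [e])) (PySem.Dict.mk []) =
      bucketsOf xs := by
  induction xs using List.reverseRecOn with
  | nil => rfl
  | append_singleton xs e ih =>
    rw [List.foldl_append]
    simp only [List.foldl]
    rw [ih, bucketsOf_append]

lemma insertBy_append_of_not_before {α : Type} (b : α → α → Bool) (x : α) (F S : List α)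
    (h : ∀ y ∈ F, b x y = false) :
    PySem.List.insertBy b x (F ++ S) = F ++ PySem.List.insertBy b x S := by
  induction F with
  | nil => simp
  | cons y F ih =>
    rw [List.cons_append, PySem.List.insertBy.eq_2, h y (by simp)]
    simp only [Bool.false_eq_true, if_false]
    rw [ih (fun z hz => h z (by simp [hz])), List.cons_append]

lemma insertBy_eq_cons_of_before {α : Type} (b : α → α → Bool) (x : α) (S : List α)
    (h : ∀ y ∈ S, b x y = true) :
    PySem.List.insertBy b x S = x :: S := by
  cases S with
  | nil => rfl
  | cons y ys => rw [PySem.List.insertBy.eq_2, h y (by simp), if_pos rfl]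

lemma sorted_rev_append_singleton {α : Type} (xs : List α) (x : α) (key : α → Int) :
    PySem.List.sorted (xs ++ [x]) key true =
      PySem.List.insertBy (fun a b => decide (key b < key a)) x (PySem.List.sorted xs key true) := by
  rw [PySem.List.sorted_rev_eq_foldl_insertBy, PySem.List.sorted_rev_eq_foldl_insertBy,
    List.foldl_append]
  simp only [List.foldl]

lemma flatMap_congr_mem {α β : Type} (L : List α) (f g : α → List β)
    (h : ∀ l ∈ L, f l = g l) : L.flatMap f = L.flatMap g := by
  induction L with
  | nil => rfl
  | cons a L ih =>
    rw [List.flatMap_cons, List.flatMap_cons, h a (by simp),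
      ih (fun l hl => h l (by simp [hl]))]

-- stable reverse sort splits off the maximal-key group
lemma sorted_rev_split {α : Type} (key : α → Int) (l : Int) :
    ∀ xs : List α, (∀ x ∈ xs, key x ≤ l) →
    PySem.List.sorted xs key true =
      xs.filter (fun x => decide (key x = l)) ++
        PySem.List.sorted (xs.filter (fun x => !decide (key x = l))) key true := by
  intro xs
  induction xs using List.reverseRecOn with
  | nil => intro _; simp
  | append_singleton xs x ih =>
    intro hle
    have hle' : ∀ y ∈ xs, key y ≤ l := fun y hy => hle y (by simp [hy])
    have hx : key x ≤ l := hle x (by simp)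
    rw [sorted_rev_append_singleton, ih hle']
    by_cases hxl : key x = l
    · rw [insertBy_append_of_not_before _ _ _ _ ?_, insertBy_eq_cons_of_before _ _ _ ?_]
      · rw [List.filter_append, List.filter_append]
        simp [hxl]
      · intro y hy
        have hy1 := (PySem.List.mem_sorted _ _ _ _).mp hy
        have hy2 := List.mem_filter.mp hy1
        have hyne : key y ≠ l := by simpa using hy2.2
        have hyle : key y ≤ l := hle' y hy2.1
        simp [hxl, lt_of_le_of_ne hyle hyne]
      · intro y hy
        have : key y = l := by simpa using (List.mem_filter.mp hy).2
        simp [this, hxl]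
    · rw [insertBy_append_of_not_before _ _ _ _ ?_]
      · rw [List.filter_append, List.filter_append]
        simp only [List.filter]
        have h1 : decide (key x = l) = false := by simp [hxl]
        simp only [h1, Bool.not_false, List.append_nil]
        rw [sorted_rev_append_singleton]
      · intro y hy
        have hyl : key y = l := by simpa using (List.mem_filter.mp hy).2
        have hnlt : ¬ key y < key x := by
          rw [hyl]
          exact not_lt.mpr (lt_of_le_of_ne hx hxl).le
        simp [hnlt]

-- stable reverse sort = concatenation of the key groups in strictly descending key order
lemma sorted_rev_eq_groups {α : Type} (key : α → Int) :
    ∀ (L : List Int) (xs : List α), L.Pairwise (fun a b => b < a) → (∀ x ∈ xs, key x ∈ L) →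
    PySem.List.sorted xs key true = L.flatMap (fun l => xs.filter (fun x => decide (key x = l))) := by
  intro L
  induction L with
  | nil =>
    intro xs _ hmem
    have hnil : xs = [] := by
      cases xs with
      | nil => rfl
      | cons a as => exact absurd (hmem a (by simp)) (by simp)
    subst hnil
    rfl
  | cons l L ih =>
    intro xs hpw hmem
    have hlt : ∀ l' ∈ L, l' < l := (List.pairwise_cons.mp hpw).1
    have hle : ∀ x ∈ xs, key x ≤ l := by
      intro x hx
      rcases List.mem_cons.mp (hmem x hx) with h | h
      · exact le_of_eq h
      · exact le_of_lt (hlt _ h)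
    rw [sorted_rev_split key l xs hle, List.flatMap_cons]
    congr 1
    rw [ih _ (List.pairwise_cons.mp hpw).2 ?_]
    · apply flatMap_congr_mem
      intro l' hl'
      have hne : l' ≠ l := ne_of_lt (hlt l' hl')
      rw [List.filter_filter]
      apply List.filter_congr
      intro x hx
      by_cases h : key x = l' <;> simp [h, hne]
    · intro x hx
      have hx' := List.mem_filter.mp hx
      have hne : key x ≠ l := by simpa using hx'.2
      rcases List.mem_cons.mp (hmem x hx'.1) with h | h
      · exact absurd h hne
      · exact h

-- ===== VERDICT (by name: the statement is the Claim_ definition above) =====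
theorem match_entries_py_spec : Claim_equal_match_entries_py := by
  intro entries nts _
  unfold Spec_match_entries_py match_entries_py match_entries_py_alt
  simp only []
  rw [matchedA_eq]
  rw [PySem.List.foldl_congr_mem _ _
    (fun d e => if hitsP nts e then d.insert (bLen e) (d.getD (bLen e) [] ++ [e]) else d) _
    (by intro d x _; rw [bHits_eq])]
  rw [PySem.List.foldl_if_eq_foldl_filter, buckets_fold]
  have hkeys : (bucketsOf (entries.filter (hitsP nts))).keys =
      PySem.List.dedup ((entries.filter (hitsP nts)).map bLen) := by
    simp only [bucketsOf, PySem.Dict.keys, List.map_map]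
    exact List.map_id _
  rw [hkeys]
  rw [PySem.List.foldl_append_eq_flatMap (fun l => (bucketsOf (entries.filter (hitsP nts))).getD l []) _ []]
  rw [List.nil_append]
  rw [flatMap_congr_mem _ _
    (fun l => (entries.filter (hitsP nts)).filter (fun e => decide (bLen e = l))) ?_]
  · have hnd : (PySem.List.sorted (PySem.List.dedup ((entries.filter (hitsP nts)).map bLen))
        (fun l => l) true).Nodup :=
      ((PySem.List.sorted_perm _ _ _).nodup_iff).mpr (PySem.List.nodup_dedup _)
    have hpw1 := PySem.List.sorted_pairwise_rev
      (PySem.List.dedup ((entries.filter (hitsP nts)).map bLen)) (fun l => l)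
    have hpw : (PySem.List.sorted (PySem.List.dedup ((entries.filter (hitsP nts)).map bLen))
        (fun l => l) true).Pairwise (fun a b => b < a) := by
      refine (hpw1.and hnd).imp ?_
      intro a b hab
      exact lt_of_le_of_ne hab.1 (Ne.symm hab.2)
    have hmem : ∀ x ∈ entries.filter (hitsP nts), bLen x ∈
        PySem.List.sorted (PySem.List.dedup ((entries.filter (hitsP nts)).map bLen)) (fun l => l) true := by
      intro x hx
      exact (PySem.List.mem_sorted _ _ _ _).mpr
        ((PySem.List.mem_dedup _ _).mpr (List.mem_map_of_mem hx))
    exact sorted_rev_eq_groups bLen _ (entries.filter (hitsP nts)) hpw hmem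
  · intro l hl
    rw [getD_bucketsOf, if_pos]
    exact (PySem.List.mem_sorted _ _ _ _).mp hl
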